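-- pv_equiv track=rewrite | github.com/potacotion/DTS_AutoLogin | main.py | _python_bi_to_hex
-- ===== SOURCE A (Python) =====
-- def _python_digit_to_hex(n_16bit_digit):
--     hex_chars = "0123456789abcdef"  # JS hexToChar is lowercase
--     result_chars = []
--     # JS digitToHex: for (i = 0; i < 4; ++i) { result += hexToChar[n & mask]; n >>>= 4; } return RSAUtils.reverseStr(result);
--     # This means it takes LSB nibble first, then next, etc., and then reverses the string of 4 hex chars.
--     # So, "0x1234" -> n=0x1234.
--     # 1. n&0xF = 4. result="4". n=0x123.
--     # 2. n&0xF = 3. result="43". n=0x12.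
--     # 3. n&0xF = 2. result="432". n=0x1.
--     # 4. n&0xF = 1. result="4321". n=0x0.
--     # reverse("4321") -> "1234". This is correct.
--     for _ in range(4):
--         result_chars.append(hex_chars[n_16bit_digit & 0xF])
--         n_16bit_digit >>= 4
--     return "".join(reversed(result_chars))
--
-- def _python_bi_to_hex(big_int_val):
--     if big_int_val == 0:
--         # JS: biHighIndex(bigZero) is 0. Loop runs for i=0. digitToHex(0) is "0000".
--         return "0000"
--
--     bi_radix_bits = 16
--     digits_list = []  # This will store 16-bit words, LSW first
--     temp_val = big_int_val
--     while temp_val > 0: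
--         digits_list.append(temp_val & ((1 << bi_radix_bits) - 1))  # Get LSW 16 bits
--         temp_val >>= bi_radix_bits
--
--     if not digits_list:  # Should only happen if big_int_val was 0, handled above.
--         return ""  # Or raise error, but for 0 it's "0000"
--
--     # JS biToHex iterates from biHighIndex (MSW digit) down to 0 (LSW digit)
--     # and prepends the hex of each digit.
--     # result = ""; for (var i = RSAUtils.biHighIndex(x); i > -1; --i) { result += RSAUtils.digitToHex(x.digits[i]); }
--     # Our digits_list is LSW first (digits_list[0] is LSW).
--     # So we iterate it in reverse to get MSW first.
--     hex_result_parts = []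
--     for i in range(len(digits_list) - 1, -1, -1):  # Iterate from MSW digit down to LSW digit
--         hex_result_parts.append(_python_digit_to_hex(digits_list[i]))
--
--     final_hex = "".join(hex_result_parts)
--     # RSAUtils.biToHex itself does not ensure an overall even length by prepending a single "0" to the whole string.
--     # It ensures each 16-bit digit becomes 4 hex chars, so the total length is always a multiple of 4.
--     return final_hex
-- ===== SOURCE B (Python) =====
-- def _hex_words(n):
--     if n <= 0:
--         return ''
--     return _hex_words(n >> 16) + '%04x' % (n & 0xFFFF)
--
--
-- def _python_bi_to_hex(big_int_val):
--     if big_int_val == 0: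
--         return "0000"
--     return _hex_words(big_int_val)
-- ===== Notes on version B (the rewrite author's own statement) =====
-- stated objective: simpler
-- what changed: Replaced A's two-phase pipeline (collect 16-bit words LSW-first into a list with a shift/mask loop, render each word nibble-by-nibble via a char-list helper with two reversals, then re-join MSW-first by a reverse index loop) with one direct recursion that emits the 16-bit words MSW-first, each rendered by a single '%04x' format.
import Mathlib
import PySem

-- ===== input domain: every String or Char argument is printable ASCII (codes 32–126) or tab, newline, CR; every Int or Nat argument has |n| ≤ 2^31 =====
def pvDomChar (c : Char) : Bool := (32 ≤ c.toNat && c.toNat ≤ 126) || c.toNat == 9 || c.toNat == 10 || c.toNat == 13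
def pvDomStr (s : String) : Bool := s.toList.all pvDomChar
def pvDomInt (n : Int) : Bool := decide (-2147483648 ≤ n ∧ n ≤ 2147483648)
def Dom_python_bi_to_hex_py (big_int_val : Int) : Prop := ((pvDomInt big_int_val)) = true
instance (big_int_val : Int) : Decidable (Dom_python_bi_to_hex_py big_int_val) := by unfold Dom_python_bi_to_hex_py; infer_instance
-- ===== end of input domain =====

-- B replaces A's two-phase base-2^16 pipeline (collect words LSW-first, render each
-- word nibble-by-nibble with two reversals, re-join MSW-first by a reverse index loop)
-- with one direct recursion emitting the words MSW-first via '%04x'; objective: simpler.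

-- ===== PORT A =====
-- hex_chars = "0123456789abcdef"
def pvHexChars : String := "0123456789abcdef"

-- the 'for _ in range(4)' loop of _python_digit_to_hex; the string index
-- 'hex_chars[n & 0xF]' is always in range (n & 0xF ∈ [0,15]), so .getD is exact
def pvDigitLoopA : Nat → Int → List Char → List Char
  | 0, _, acc => acc
  | k + 1, n, acc =>
      pvDigitLoopA k (n >>> (4 : Nat)) (acc ++ [(PySem.Str.pyGet? pvHexChars (PySem.Int.band n 15)).getD ' '])

-- _python_digit_to_hex: run the loop, then "".join(reversed(result_chars))
def pvDigitToHexA (n : Int) : String := String.ofList (pvDigitLoopA 4 n []).reverse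

-- the 'while temp_val > 0' loop building digits_list (LSW first)
def pvCollectDigitsA (v : Int) : List Int :=
  if _h : 0 < v then PySem.Int.band v ((1 <<< (16 : Nat)) - 1) :: pvCollectDigitsA (v >>> (16 : Nat)) else []
termination_by v.toNat
decreasing_by
  have h16 : v >>> (16 : Nat) = v / 65536 := Int.shiftRight_eq_div_pow v 16
  omega

def python_bi_to_hex_py (big_int_val : Int) : String :=
  if big_int_val = 0 then "0000"
  else
    let digits_list := pvCollectDigitsA big_int_val
    if digits_list = [] then ""
    else
      -- for i in range(len(digits_list) - 1, -1, -1): parts.append(digit_to_hex(digits_list[i]))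
      let parts := (PySem.List.pyRange ((digits_list.length : Int) - 1) (-1) (-1)).foldl
        (fun acc i => acc ++ [pvDigitToHexA (PySem.List.pyGetD digits_list i 0)]) []
      PySem.Str.join "" parts

-- ===== PORT B =====
def pvHexDigitB (d : Nat) : Char := "0123456789abcdef".toList.getD d ' '

-- lowercase hex digits of a nonnegative int (the digit string '%x' produces)
def pvNatToHexB (n : Nat) : List Char :=
  if _h : n < 16 then [pvHexDigitB n] else pvNatToHexB (n / 16) ++ [pvHexDigitB (n % 16)]
termination_by n
decreasing_by omega

-- '%04x' % m: the lowercase hex of m left-padded with '0' to minimum width 4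
-- (exact here: m = n & 0xFFFF is nonnegative)
def pvFmt04x (m : Nat) : List Char :=
  List.replicate (4 - (pvNatToHexB m).length) '0' ++ pvNatToHexB m

-- _hex_words, as the char list of the string it builds
def pvHexWordsB (n : Int) : List Char :=
  if _h : 0 < n then pvHexWordsB (n >>> (16 : Nat)) ++ pvFmt04x (PySem.Int.band n 65535).toNat else []
termination_by n.toNat
decreasing_by
  have h16 : n >>> (16 : Nat) = n / 65536 := Int.shiftRight_eq_div_pow n 16
  omega

def python_bi_to_hex_py_alt (big_int_val : Int) : String :=
  if big_int_val = 0 then "0000"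
  else String.ofList (pvHexWordsB big_int_val)

-- ===== PRECONDITION & SPEC =====
def Spec_python_bi_to_hex_py (big_int_val : Int) (out : String) : Prop := out = python_bi_to_hex_py_alt big_int_val
instance (big_int_val : Int) (out : String) : Decidable (Spec_python_bi_to_hex_py big_int_val out) := by unfold Spec_python_bi_to_hex_py; infer_instance

-- ===== CLAIM (what is proved, stated in full; the proofs are below) =====
def Claim_equal_python_bi_to_hex_py : Prop := ∀ (big_int_val : Int), Dom_python_bi_to_hex_py big_int_val → Spec_python_bi_to_hex_py big_int_val (python_bi_to_hex_py big_int_val)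

-- ===== LEMMAS AND PROOFS =====

theorem pv_shift_cast (m : Nat) (k : Nat) : ((m : Int) >>> k) = ((m >>> k : Nat) : Int) := by
  simp [Int.shiftRight_eq_div_pow, Nat.shiftRight_eq_div_pow]

theorem pv_hex_lookup (d : Nat) (_hd : d < 16) :
    (PySem.Str.pyGet? pvHexChars ((d : Nat) : Int)).getD ' ' = pvHexDigitB d := by
  rw [PySem.Str.pyGet?_natCast]
  simp [pvHexChars, pvHexDigitB, List.getD_eq_getElem?_getD]

theorem pv_loop_step (k : Nat) (m : Nat) (acc : List Char) :
    pvDigitLoopA (k + 1) (m : Int) acc = pvDigitLoopA k ((m / 16 : Nat) : Int) (acc ++ [pvHexDigitB (m % 16)]) := by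
  have hband : PySem.Int.band (m : Int) 15 = ((m % 16 : Nat) : Int) := by
    rw [show ((15 : Int) = ((15 : Nat) : Int)) from rfl, PySem.Int.band_natCast]
    congr 1
    simpa using Nat.and_two_pow_sub_one_eq_mod m 4
  have hshift : ((m : Int) >>> (4 : Nat)) = ((m / 16 : Nat) : Int) := by
    rw [pv_shift_cast]
    congr 1
    simp [Nat.shiftRight_eq_div_pow]
  rw [pvDigitLoopA, hband, hshift, pv_hex_lookup (m % 16) (by omega)]

theorem pv_loop_chars (k : Nat) : ∀ (x : Nat) (acc : List Char),
    pvDigitLoopA k (x : Int) acc = acc ++ (List.range k).map (fun i => pvHexDigitB (x / 16 ^ i % 16)) := by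
  induction k with
  | zero => intro x acc; simp [pvDigitLoopA]
  | succ k ih =>
      intro x acc
      rw [pv_loop_step, ih]
      have hdiv : ∀ i, x / 16 / 16 ^ i % 16 = x / 16 ^ (i + 1) % 16 := fun i => by
        rw [Nat.div_div_eq_div_mul, pow_succ, mul_comm]
      simp [List.range_succ_eq_map, List.map_map, Function.comp_def, hdiv]

theorem pv_digit_chars (m : Nat) :
    (pvDigitToHexA (m : Int)).toList =
      [pvHexDigitB (m / 4096 % 16), pvHexDigitB (m / 256 % 16), pvHexDigitB (m / 16 % 16), pvHexDigitB (m % 16)] := by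
  simp only [pvDigitToHexA]
  rw [pv_loop_chars]
  norm_num [List.range_succ]

theorem pv_collect_step (m : Nat) (hm : 0 < m) :
    pvCollectDigitsA (m : Int) = ((m % 65536 : Nat) : Int) :: pvCollectDigitsA ((m / 65536 : Nat) : Int) := by
  rw [pvCollectDigitsA.eq_def]
  have hpos : (0 : Int) < (m : Int) := by exact_mod_cast hm
  rw [dif_pos hpos]
  have hband : PySem.Int.band (m : Int) ((1 <<< (16 : Nat)) - 1) = ((m % 65536 : Nat) : Int) := by
    rw [show ((1 <<< (16 : Nat) : Int) - 1 = ((65535 : Nat) : Int)) from rfl, PySem.Int.band_natCast]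
    congr 1
    simpa using Nat.and_two_pow_sub_one_eq_mod m 16
  have hshift : ((m : Int) >>> (16 : Nat)) = ((m / 65536 : Nat) : Int) := by
    rw [pv_shift_cast]
    congr 1
    simp [Nat.shiftRight_eq_div_pow]
  rw [hband, hshift]

theorem pv_words_step (m : Nat) (hm : 0 < m) :
    pvHexWordsB (m : Int) = pvHexWordsB ((m / 65536 : Nat) : Int) ++ pvFmt04x (m % 65536) := by
  rw [pvHexWordsB.eq_def]
  have hpos : (0 : Int) < (m : Int) := by exact_mod_cast hm
  rw [dif_pos hpos]
  have hband : PySem.Int.band (m : Int) 65535 = ((m % 65536 : Nat) : Int) := by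
    rw [show ((65535 : Int) = ((65535 : Nat) : Int)) from rfl, PySem.Int.band_natCast]
    congr 1
    simpa using Nat.and_two_pow_sub_one_eq_mod m 16
  have hshift : ((m : Int) >>> (16 : Nat)) = ((m / 65536 : Nat) : Int) := by
    rw [pv_shift_cast]
    congr 1
    simp [Nat.shiftRight_eq_div_pow]
  rw [hband, hshift, Int.toNat_natCast]

theorem pv_hex_unfold (n : Nat) (h : 16 ≤ n) :
    pvNatToHexB n = pvNatToHexB (n / 16) ++ [pvHexDigitB (n % 16)] := by
  rw [pvNatToHexB.eq_def]
  simp [Nat.not_lt.2 h]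

theorem pv_zero_digit : pvHexDigitB 0 = '0' := by decide

theorem pv_fmt_small (m : Nat) (h1 : m < 65536) :
    pvFmt04x m =
      [pvHexDigitB (m / 4096 % 16), pvHexDigitB (m / 256 % 16), pvHexDigitB (m / 16 % 16), pvHexDigitB (m % 16)] := by
  rcases Nat.lt_or_ge m 16 with h | h
  · have h16 : pvNatToHexB m = [pvHexDigitB m] := by
      rw [pvNatToHexB.eq_def]; simp [h]
    rw [pvFmt04x, h16,
        show m / 4096 % 16 = 0 from by omega,
        show m / 256 % 16 = 0 from by omega,
        show m / 16 % 16 = 0 from by omega,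
        show m % 16 = m from by omega, pv_zero_digit]
    simp
  rcases Nat.lt_or_ge m 256 with h' | h'
  · have hA := pv_hex_unfold m h
    have hB : pvNatToHexB (m / 16) = [pvHexDigitB (m / 16)] := by
      rw [pvNatToHexB.eq_def]; simp [show m / 16 < 16 from by omega]
    rw [pvFmt04x, hA, hB,
        show m / 4096 % 16 = 0 from by omega,
        show m / 256 % 16 = 0 from by omega, pv_zero_digit,
        show m / 16 = m / 16 % 16 from by omega]
    simp
  rcases Nat.lt_or_ge m 4096 with h'' | h''
  · have hA := pv_hex_unfold m h
    have hB := pv_hex_unfold (m / 16) (by omega)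
    have hC : pvNatToHexB (m / 16 / 16) = [pvHexDigitB (m / 16 / 16)] := by
      rw [pvNatToHexB.eq_def]; simp [show m / 16 / 16 < 16 from by omega]
    rw [pvFmt04x, hA, hB, hC,
        show m / 16 / 16 = m / 256 % 16 from by omega,
        show m / 4096 % 16 = 0 from by omega, pv_zero_digit]
    simp
  · have hA := pv_hex_unfold m h
    have hB := pv_hex_unfold (m / 16) (by omega)
    have hC := pv_hex_unfold (m / 16 / 16) (by omega)
    have hD : pvNatToHexB (m / 16 / 16 / 16) = [pvHexDigitB (m / 16 / 16 / 16)] := by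
      rw [pvNatToHexB.eq_def]; simp [show m / 16 / 16 / 16 < 16 from by omega]
    rw [pvFmt04x, hA, hB, hC, hD,
        show m / 16 / 16 / 16 = m / 4096 % 16 from by omega,
        show m / 16 / 16 % 16 = m / 256 % 16 from by omega]
    simp

theorem pv_join_nil_eq_flatten (xs : List (List Char)) :
    PySem.Chars.join [] xs = xs.flatten := by
  induction xs with
  | nil => simp [PySem.Chars.join_nil]
  | cons p rest ih =>
      cases rest with
      | nil => simp [PySem.Chars.join_singleton]
      | cons q t =>
          rw [PySem.Chars.join_cons_cons]
          simp at ih ⊢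
          exact ih

theorem pv_main (m : Nat) (hm : 0 < m) :
    ((pvCollectDigitsA (m : Int)).reverse.map (fun d => (pvDigitToHexA d).toList)).flatten =
      pvHexWordsB (m : Int) := by
  induction m using Nat.strong_induction_on with
  | _ m ih =>
    rw [pv_collect_step m hm, pv_words_step m hm]
    rcases Nat.lt_or_ge m 65536 with h | h
    · have hz0 : m / 65536 = 0 := by omega
      have hz : pvCollectDigitsA ((m / 65536 : Nat) : Int) = [] := by
        rw [hz0, pvCollectDigitsA.eq_def]; simp
      have hw : pvHexWordsB ((m / 65536 : Nat) : Int) = [] := by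
        rw [hz0, pvHexWordsB.eq_def]; simp
      rw [hz, hw]
      simp only [List.reverse_cons, List.reverse_nil, List.nil_append, List.map_cons,
        List.map_nil, List.flatten_cons, List.flatten_nil, List.append_nil]
      rw [pv_digit_chars, pv_fmt_small (m % 65536) (by omega)]
    · have hq : 0 < m / 65536 := by omega
      have hlt : m / 65536 < m := by omega
      have hih := ih (m / 65536) hlt hq
      simp only [List.reverse_cons, List.map_append, List.map_cons, List.map_nil,
        List.flatten_append, List.flatten_cons, List.flatten_nil, List.append_nil]
      rw [hih, pv_digit_chars, pv_fmt_small (m % 65536) (by omega)]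

theorem pv_collect_ne_nil (m : Nat) (hm : 0 < m) : pvCollectDigitsA (m : Int) ≠ [] := by
  rw [pv_collect_step m hm]
  simp

-- ===== VERDICT (by name: the statement is the Claim_ definition above) =====
theorem python_bi_to_hex_py_spec : Claim_equal_python_bi_to_hex_py := by
  intro v _
  unfold Spec_python_bi_to_hex_py
  rcases lt_trichotomy v 0 with hneg | hzero | hpos
  · -- negative: A's word list stays empty and B's recursion stops at once; both give ""
    have hc : pvCollectDigitsA v = [] := by
      rw [pvCollectDigitsA.eq_def, dif_neg (by omega)]
    have hw : pvHexWordsB v = [] := by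
      rw [pvHexWordsB.eq_def, dif_neg (by omega)]
    unfold python_bi_to_hex_py python_bi_to_hex_py_alt
    simp [hc, hw, show ¬ v = 0 by omega]
  · subst hzero
    unfold python_bi_to_hex_py python_bi_to_hex_py_alt
    simp
  · obtain ⟨m, rfl⟩ : ∃ m : Nat, v = (m : Int) := ⟨v.toNat, by omega⟩
    have hm : 0 < m := by exact_mod_cast hpos
    apply String.toList_inj.mp
    unfold python_bi_to_hex_py
    rw [if_neg (by omega : ¬ ((m : Int) = 0)), if_neg (pv_collect_ne_nil m hm)]
    rw [PySem.List.foldl_append_singleton_eq_map]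
    simp only [List.nil_append]
    rw [show PySem.List.pyRange (((pvCollectDigitsA (m : Int)).length : Int) - 1) (-1) (-1)
          = (PySem.List.pyRange 0 ((pvCollectDigitsA (m : Int)).length : Int)).reverse by
        rw [PySem.List.pyRange_neg_one_eq_reverse]; norm_num]
    rw [List.map_reverse]
    rw [show (PySem.List.pyRange 0 ((pvCollectDigitsA (m : Int)).length : Int)).map
            (fun i => pvDigitToHexA (PySem.List.pyGetD (pvCollectDigitsA (m : Int)) i 0))
          = ((PySem.List.pyRange 0 ((pvCollectDigitsA (m : Int)).length : Int)).map
            (fun i => PySem.List.pyGetD (pvCollectDigitsA (m : Int)) i 0)).map pvDigitToHexA by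
        rw [List.map_map]; rfl]
    rw [show ((pvCollectDigitsA (m : Int)).length : Int) = PySem.List.len (pvCollectDigitsA (m : Int)) by simp,
        PySem.List.map_pyGetD_pyRange_zero]
    rw [PySem.Str.toList_join]
    rw [← List.map_reverse, List.map_map, show ("".toList : List Char) = [] from rfl, pv_join_nil_eq_flatten]
    rw [show (String.toList ∘ pvDigitToHexA) = (fun d => (pvDigitToHexA d).toList) from rfl]
    rw [pv_main m hm]
    unfold python_bi_to_hex_py_alt
    rw [if_neg (by omega : ¬ ((m : Int) = 0))]
    simp
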